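-- pv_equiv track=rewrite | github.com/3284552971/spatial-database | space_app/models/sql_router.py | _upper_outside_quotes
-- ===== SOURCE A (Python) =====
-- from typing import Any, Dict, List, Optional, Union
--
-- def _upper_outside_quotes(sql: str) -> str:
-- 	out: List[str] = []
-- 	in_single = False
-- 	in_double = False
-- 	for ch in sql:
-- 		if ch == "'" and not in_double:
-- 			in_single = not in_single
-- 			out.append(ch)
-- 			continue
-- 		if ch == '"' and not in_single:
-- 			in_double = not in_double
-- 			out.append(ch)
-- 			continue
-- 		out.append(ch if (in_single or in_double) else ch.upper())
-- 	return "".join(out)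
-- ===== SOURCE B (Python) =====
-- def _upper_outside_quotes(sql: str) -> str:
--     # Slice-based tokenizer: jump between quote delimiters instead of per-char flag tracking.
--     parts = []
--     i = 0
--     n = len(sql)
--     while i < n:
--         ch = sql[i]
--         if ch == "'" or ch == '"':
--             j = sql.find(ch, i + 1)
--             if j == -1:
--                 parts.append(sql[i:])
--                 i = n
--             else:
--                 parts.append(sql[i:j + 1])
--                 i = j + 1
--         else:
--             j = i
--             while j < n and sql[j] != "'" and sql[j] != '"':
--                 j += 1
--             parts.append(sql[i:j].upper())
--             i = j
--     return "".join(parts)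
-- ===== Notes on version B (the rewrite author's own statement) =====
-- stated objective: alternative
-- what changed: Replaces the per-character loop with in_single/in_double boolean state by a slice-based tokenizer that jumps from quote to matching quote, emitting quoted spans verbatim and uppercasing whole unquoted runs at once.
import Mathlib
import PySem

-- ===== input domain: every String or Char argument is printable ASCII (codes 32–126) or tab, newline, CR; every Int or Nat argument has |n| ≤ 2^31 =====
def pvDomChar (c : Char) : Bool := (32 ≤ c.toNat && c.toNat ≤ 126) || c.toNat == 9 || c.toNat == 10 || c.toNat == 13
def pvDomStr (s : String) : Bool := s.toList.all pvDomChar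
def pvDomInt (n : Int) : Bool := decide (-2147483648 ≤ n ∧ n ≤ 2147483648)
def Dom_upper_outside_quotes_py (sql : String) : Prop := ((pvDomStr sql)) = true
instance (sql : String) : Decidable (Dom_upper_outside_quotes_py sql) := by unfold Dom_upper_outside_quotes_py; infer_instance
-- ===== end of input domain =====

-- B replaces A's per-character flag machine by a slice-based tokenizer (alternative decomposition, same cost).

-- ===== PORT A =====
-- A: one pass with in_single/in_double flags, char-by-char append; state = (out, in_single, in_double).
def pvAStep (st : List Char × Bool × Bool) (ch : Char) : List Char × Bool × Bool :=
  if ch = '\'' ∧ st.2.2 = false then (st.1 ++ [ch], !st.2.1, st.2.2)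
  else if ch = '"' ∧ st.2.1 = false then (st.1 ++ [ch], st.2.1, !st.2.2)
  else (st.1 ++ [if st.2.1 || st.2.2 then ch else PySem.Chars.upperChar ch], st.2.1, st.2.2)

def upper_outside_quotes_py (sql : String) : String :=
  String.ofList (sql.toList.foldl pvAStep ([], false, false)).1

-- ===== PORT B =====
-- B: tokenizer — at a quote, take the span up to the matching quote verbatim;
-- otherwise take the run up to the next quote and uppercase it whole.
def pvNotQuote (c : Char) : Bool := c ≠ '\'' ∧ c ≠ '"'

def pvAltGo : List Char → List Char
  | [] => []
  | c :: rest =>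
    if c = '\'' ∨ c = '"' then
      let tok := rest.takeWhile (· ≠ c)
      match h : rest.dropWhile (· ≠ c) with
      | [] => c :: tok
      | _ :: rest' => (c :: tok ++ [c]) ++ pvAltGo rest'
    else
      PySem.Chars.upper ((c :: rest).takeWhile pvNotQuote) ++ pvAltGo (rest.dropWhile pvNotQuote)
termination_by l => l.length
decreasing_by
  · have h1 : (rest.dropWhile (· ≠ c)).length ≤ rest.length := List.length_dropWhile_le _ _
    rw [h] at h1; simp at h1 ⊢; omega
  · have h1 : (rest.dropWhile pvNotQuote).length ≤ rest.length := List.length_dropWhile_le _ _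
    simp; omega

def upper_outside_quotes_py_alt (sql : String) : String :=
  String.ofList (pvAltGo sql.toList)

-- ===== PRECONDITION & SPEC =====
def Spec_upper_outside_quotes_py (sql : String) (out : String) : Prop := out = upper_outside_quotes_py_alt sql
instance (sql : String) (out : String) : Decidable (Spec_upper_outside_quotes_py sql out) := by unfold Spec_upper_outside_quotes_py; infer_instance

-- ===== CLAIM (what is proved, stated in full; the proofs are below) =====
def Claim_equal_upper_outside_quotes_py : Prop := ∀ (sql : String), Dom_upper_outside_quotes_py sql → Spec_upper_outside_quotes_py sql (upper_outside_quotes_py sql)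

-- ===== LEMMAS AND PROOFS =====

-- Recursive characterization of A's foldl (state = the two flags).
def pvARec (s d : Bool) : List Char → List Char
  | [] => []
  | ch :: t =>
    if ch = '\'' ∧ d = false then ch :: pvARec (!s) d t
    else if ch = '"' ∧ s = false then ch :: pvARec s (!d) t
    else (if s || d then ch else PySem.Chars.upperChar ch) :: pvARec s d t

lemma pvFoldl_eq_aRec (l : List Char) : ∀ (out : List Char) (s d : Bool),
    (l.foldl pvAStep (out, s, d)).1 = out ++ pvARec s d l := by
  induction l with
  | nil => intro out s d; simp [pvARec]
  | cons ch t ih =>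
    intro out s d
    simp only [List.foldl_cons, pvAStep, pvARec]
    split_ifs <;> rw [ih] <;> simp

-- Inside a quote opened by q, A copies verbatim until the matching q, then resets.
lemma pvARec_inQuote (q : Char) (hq : q = '\'' ∨ q = '"') :
    ∀ (l : List Char),
      pvARec (decide (q = '\'')) (decide (q = '"')) l =
        l.takeWhile (· ≠ q) ++
          (match l.dropWhile (· ≠ q) with
            | [] => []
            | _ :: t => q :: pvARec false false t) := by
  intro l
  induction l with
  | nil => simp [pvARec]
  | cons ch t ih =>
    by_cases hch : ch = q
    · subst hch
      rcases hq with h | h <;> subst h <;>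
        simp [pvARec]
    · have hq1 : ¬ (ch = '\'' ∧ (decide (q = '"')) = false) := by
        rcases hq with h | h <;> subst h <;> simp_all
      have hq2 : ¬ (ch = '"' ∧ (decide (q = '\'')) = false) := by
        rcases hq with h | h <;> subst h <;> simp_all
      have hsd : (decide (q = '\'') || decide (q = '"')) = true := by
        rcases hq with h | h <;> subst h <;> simp
      simp only [pvARec, hq1, hq2, if_false, hsd, if_true,
        List.takeWhile_cons, List.dropWhile_cons]
      simp [hch, ih]

-- B consumes one uppercased character when the head is not a quote.
lemma pvAltGo_cons_nonquote (c : Char) (rest : List Char) (hc : pvNotQuote c = true) :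
    pvAltGo (c :: rest) = PySem.Chars.upperChar c :: pvAltGo rest := by
  have hc' : ¬ (c = '\'' ∨ c = '"') := by
    intro h; rcases h with h | h <;> simp [pvNotQuote, h] at hc
  cases rest with
  | nil => simp [pvAltGo, hc', hc, PySem.Chars.upper]
  | cons c' rest' =>
    by_cases hc2 : pvNotQuote c' = true
    · have hc2' : ¬ (c' = '\'' ∨ c' = '"') := by
        intro h; rcases h with h | h <;> simp [pvNotQuote, h] at hc2
      rw [pvAltGo, pvAltGo]
      simp [hc', hc2', hc, hc2, PySem.Chars.upper]
    · have hc2' : c' = '\'' ∨ c' = '"' := by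
        by_cases h1 : c' = '\''
        · exact Or.inl h1
        · by_cases h2 : c' = '"'
          · exact Or.inr h2
          · exact absurd (by simp [pvNotQuote, h1, h2]) hc2
      rw [pvAltGo]
      simp [hc', hc, hc2, PySem.Chars.upper]

-- Main equivalence of the two loop bodies, by strong induction on the length.
lemma pvARec_eq_altGo (l : List Char) : pvARec false false l = pvAltGo l := by
  suffices h : ∀ (n : Nat) (l : List Char), l.length ≤ n → pvARec false false l = pvAltGo l from
    h l.length l le_rfl
  intro n
  induction n with
  | zero =>
    intro l hl
    have : l = [] := List.eq_nil_of_length_eq_zero (Nat.le_zero.mp hl)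
    subst this; simp [pvARec, pvAltGo]
  | succ n ih =>
    intro l hl
    cases l with
    | nil => simp [pvARec, pvAltGo]
    | cons c rest =>
      by_cases hq : c = '\'' ∨ c = '"'
      · have hrec : pvARec false false (c :: rest) =
            c :: pvARec (decide (c = '\'')) (decide (c = '"')) rest := by
          rcases hq with h | h <;> subst h <;> simp [pvARec]
        rw [hrec, pvARec_inQuote c hq rest, pvAltGo, if_pos hq]
        cases h : rest.dropWhile (· ≠ c) with
        | nil => simp
        | cons x rest' =>
          have hlen : rest'.length ≤ n := by
            have h1 : (rest.dropWhile (· ≠ c)).length ≤ rest.length :=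
              List.length_dropWhile_le _ _
            rw [h] at h1; simp at h1 hl; omega
          simp [ih rest' hlen]
      · have hc : pvNotQuote c = true := by
          simp only [not_or] at hq; simp [pvNotQuote, hq.1, hq.2]
        have hrec : pvARec false false (c :: rest) =
            PySem.Chars.upperChar c :: pvARec false false rest := by
          have h1 : c ≠ '\'' := fun h => hq (Or.inl h)
          have h2 : c ≠ '"' := fun h => hq (Or.inr h)
          simp [pvARec, h1, h2]
        rw [hrec, pvAltGo_cons_nonquote c rest hc,
          ih rest (by simp at hl; omega)]

-- ===== VERDICT (by name: the statement is the Claim_ definition above) =====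
theorem upper_outside_quotes_py_spec : Claim_equal_upper_outside_quotes_py := by
  intro sql _
  unfold Spec_upper_outside_quotes_py upper_outside_quotes_py upper_outside_quotes_py_alt
  rw [pvFoldl_eq_aRec, pvARec_eq_altGo]
  simp
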